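-- pv_equiv track=rewrite | github.com/distbit0/todoListManagement | utils/priority.py | generateTodoListHash
-- ===== SOURCE A (Python) =====
-- def generateTodoListHash(todoPaths):
--     indentHash = 0
--     base = 257  # A prime number used as the base for the polynomial hash
--     mod = 248900  # Modulus for keeping the hash values manageable
--     for todo in todoPaths:
--         indentation = len(todo)
--         indentHash = (indentHash * base + indentation) % mod
--     pathCount = len(todoPaths)
--     indentSum = sum(len(todo) for todo in todoPaths)
--     return (indentHash, indentSum, pathCount)
-- ===== SOURCE B (Python) =====
-- def generateTodoListHash(todoPaths):
--     lengths = [len(todo) for todo in todoPaths]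
--     n = len(lengths)
--     base = 257
--     mod = 248900
--     indentHash = sum(l * pow(base, n - 1 - i, mod) for i, l in enumerate(lengths)) % mod
--     return (indentHash, sum(lengths), n)
-- ===== Notes on version B (the rewrite author's own statement) =====
-- stated objective: alternative
-- what changed: Replaces the Horner-style fold that reduces mod 248900 at every step by a positional-power formula: each length is weighted by pow(base, n-1-i, mod) and the weighted sum is reduced modulo 248900 once at the end.
import Mathlib
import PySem

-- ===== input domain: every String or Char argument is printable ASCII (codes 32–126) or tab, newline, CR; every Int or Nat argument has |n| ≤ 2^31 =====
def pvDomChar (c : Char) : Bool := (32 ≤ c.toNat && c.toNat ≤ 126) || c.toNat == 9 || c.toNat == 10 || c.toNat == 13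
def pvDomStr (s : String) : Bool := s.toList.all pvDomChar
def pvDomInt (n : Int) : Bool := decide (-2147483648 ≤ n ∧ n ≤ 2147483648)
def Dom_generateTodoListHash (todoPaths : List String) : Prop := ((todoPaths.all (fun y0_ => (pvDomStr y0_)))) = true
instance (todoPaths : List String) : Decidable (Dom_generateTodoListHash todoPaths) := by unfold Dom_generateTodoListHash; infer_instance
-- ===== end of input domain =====

-- B replaces A's Horner fold (mod at every step) by weighting each length with an
-- explicit positional power of the base and taking the modulus once at the end
-- (objective: alternative decomposition, same cost).

-- ===== PORT A =====
def generateTodoListHash (todoPaths : List String) : Int × Int × Int :=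
  let indentHash : Int :=
    todoPaths.foldl (fun h todo => PySem.Int.mod (h * 257 + PySem.Str.len todo) 248900) 0
  let pathCount : Int := todoPaths.length
  let indentSum : Int := todoPaths.foldl (fun a todo => a + PySem.Str.len todo) 0
  (indentHash, indentSum, pathCount)

-- ===== PORT B =====
def generateTodoListHash_alt (todoPaths : List String) : Int × Int × Int :=
  let lengths : List Int := todoPaths.map (fun todo => PySem.Str.len todo)
  let n : Int := lengths.length
  let indentHash : Int :=
    PySem.Int.mod
      (((PySem.List.enumerate lengths 0).map
        (fun p => p.2 * PySem.Int.powMod 257 (n - 1 - p.1).toNat 248900)).sum)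
      248900
  (indentHash, lengths.sum, n)

-- ===== PRECONDITION & SPEC =====
def Spec_generateTodoListHash (todoPaths : List String) (out : Int × Int × Int) : Prop := out = generateTodoListHash_alt todoPaths
instance (todoPaths : List String) (out : Int × Int × Int) : Decidable (Spec_generateTodoListHash todoPaths out) := by unfold Spec_generateTodoListHash; infer_instance

-- ===== CLAIM (what is proved, stated in full; the proofs are below) =====
def Claim_equal_generateTodoListHash : Prop := ∀ (todoPaths : List String), Dom_generateTodoListHash todoPaths → Spec_generateTodoListHash todoPaths (generateTodoListHash todoPaths)

-- ===== LEMMAS AND PROOFS =====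

/-- The weighted sum both hashes compute, written structurally. -/
def pvW : List Int → Int
  | [] => 0
  | x :: xs => x * 257 ^ xs.length + pvW xs

theorem pv_mod_absorb (a k x m : Int) : (a % m * k + x) % m = (a * k + x) % m := by
  conv_lhs => rw [Int.add_emod, Int.mul_emod, Int.emod_emod_of_dvd _ dvd_rfl]
  rw [← Int.mul_emod, ← Int.add_emod]

theorem pv_horner (ls : List String) : ∀ (a : Int),
    ls.foldl (fun h todo => PySem.Int.mod (h * 257 + PySem.Str.len todo) 248900) (a % 248900)
      = (a * 257 ^ ls.length + pvW (ls.map (fun todo => PySem.Str.len todo))) % 248900 := by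
  induction ls with
  | nil => intro a; simp [pvW]
  | cons x xs ih =>
    intro a
    have hm : (0:Int) < 248900 := by norm_num
    have hacc : PySem.Int.mod ((a % 248900) * 257 + PySem.Str.len x) 248900
        = (a * 257 + PySem.Str.len x) % 248900 := by
      rw [PySem.Int.mod_eq_emod_of_pos hm, pv_mod_absorb]
    rw [List.foldl_cons, hacc, ih (a * 257 + PySem.Str.len x)]
    simp [pvW, pow_succ]
    ring_nf

theorem pv_powMod_eq (b : Int) (e : Nat) : PySem.Int.powMod b e 248900 = b ^ e % 248900 := by
  unfold PySem.Int.powMod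
  exact PySem.Int.mod_eq_emod_of_pos (by norm_num)

theorem pv_enum (ls : List Int) : ∀ (s n : Int), s + ls.length = n →
    ((PySem.List.enumerate ls s).map
        (fun p => p.2 * PySem.Int.powMod 257 (n - 1 - p.1).toNat 248900)).sum % 248900
      = pvW ls % 248900 := by
  induction ls with
  | nil => intro s n _; simp [pvW]
  | cons x xs ih =>
    intro s n h
    simp only [List.length_cons] at h
    rw [PySem.List.enumerate_cons]
    simp only [List.map_cons, List.sum_cons, pvW]
    have he : ((n : Int) - 1 - s).toNat = xs.length := by push_cast at h; omega
    rw [he, pv_powMod_eq]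
    rw [Int.add_emod, Int.mul_emod, Int.emod_emod_of_dvd _ dvd_rfl, ← Int.mul_emod,
        ih (s + 1) n (by push_cast at h ⊢; omega), ← Int.add_emod]

theorem pv_sum (xs : List String) : ∀ (a : Int),
    xs.foldl (fun a todo => a + PySem.Str.len todo) a
      = a + (xs.map (fun todo => PySem.Str.len todo)).sum := by
  induction xs with
  | nil => intro a; simp
  | cons x xs ih => intro a; rw [List.foldl_cons, ih]; simp; ring

-- ===== VERDICT (by name: the statement is the Claim_ definition above) =====
theorem generateTodoListHash_spec : Claim_equal_generateTodoListHash := by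
  intro todoPaths _
  unfold Spec_generateTodoListHash generateTodoListHash generateTodoListHash_alt
  have hm : (0:Int) < 248900 := by norm_num
  refine Prod.ext ?_ (Prod.ext ?_ ?_)
  · show todoPaths.foldl (fun h todo => PySem.Int.mod (h * 257 + PySem.Str.len todo) 248900) 0
        = PySem.Int.mod _ 248900
    rw [PySem.Int.mod_eq_emod_of_pos hm,
        pv_enum (todoPaths.map (fun todo => PySem.Str.len todo)) 0 _ (by simp)]
    have h := pv_horner todoPaths 0
    simp only [Int.zero_emod, zero_mul, zero_add] at h
    exact h
  · show todoPaths.foldl (fun a todo => a + PySem.Str.len todo) 0 = _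
    rw [pv_sum todoPaths 0]; simp
  · simp
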